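-- pv_equiv track=rewrite | github.com/noahshi/friendLLM | tokenizer.py | chunk_merge
-- ===== SOURCE A (Python) =====
-- def chunk_merge(bytes, pair, index):
--     new_bytes = []
--     for x in bytes:
--         new_x = []
--         i = 0
--         while i < len(x):
--             if i < len(x) - 1 and x[i] == pair[0] and x[i+1] == pair[1]:
--                 new_x.append(index)
--                 i += 2
--             else:
--                 new_x.append(x[i])
--                 i += 1
--         new_bytes.append(new_x)
--     return new_bytes
-- ===== SOURCE B (Python) =====
-- def chunk_merge(bytes, pair, index):
--     p0, p1 = pair
--     out = []
--     for x in bytes: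
--         stack = []
--         just_merged = False
--         for v in x:
--             if not just_merged and stack and stack[-1] == p0 and v == p1:
--                 stack[-1] = index
--                 just_merged = True
--             else:
--                 stack.append(v)
--                 just_merged = False
--         out.append(stack)
--     return out
-- ===== Notes on version B (the rewrite author's own statement) =====
-- stated objective: idiomatic
-- what changed: Replaced the index-based while loop with lookahead by a single forward for-loop over the values that maintains an output stack and a just_merged flag, merging by lookbehind (pop/replace the top) instead of indexing x[i], x[i+1].
import Mathlib
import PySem

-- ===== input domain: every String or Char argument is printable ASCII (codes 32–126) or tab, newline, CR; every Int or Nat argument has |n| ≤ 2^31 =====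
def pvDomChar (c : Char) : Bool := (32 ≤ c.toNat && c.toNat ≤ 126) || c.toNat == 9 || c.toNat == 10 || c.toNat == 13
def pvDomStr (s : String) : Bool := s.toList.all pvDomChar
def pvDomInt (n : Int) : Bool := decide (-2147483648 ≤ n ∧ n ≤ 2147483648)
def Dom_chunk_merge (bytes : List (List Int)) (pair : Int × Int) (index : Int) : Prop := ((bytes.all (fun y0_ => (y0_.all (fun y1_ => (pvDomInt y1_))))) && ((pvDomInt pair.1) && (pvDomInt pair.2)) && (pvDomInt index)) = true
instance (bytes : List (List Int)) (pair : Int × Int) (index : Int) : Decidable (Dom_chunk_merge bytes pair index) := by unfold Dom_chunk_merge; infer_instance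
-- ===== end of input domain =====

-- B replaces A's index-based while loop (lookahead x[i], x[i+1], i += 2) with a single
-- forward scan that maintains an output stack and a just_merged flag (lookbehind merge).
-- Objective: idiomatic; same asymptotic cost.

-- ===== PORT A =====
-- A's inner while loop: i is the index, acc is new_x (appended at the back).
-- 'i < len(x) - 1' is written 'i + 1 < x.length' (equivalent for Nat i, since i < x.length here);
-- x[i] is written x.getD i 0, exact because the loop guarantees i (and i+1 in the branch) in range.
def chunkMergeLoopA (x : List Int) (p0 p1 idx : Int) (fuel : Nat) (i : Nat) (acc : List Int) : List Int :=
  match fuel with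
  | 0 => acc
  | Nat.succ f =>
    if i < x.length then
      if i + 1 < x.length ∧ x.getD i 0 = p0 ∧ x.getD (i+1) 0 = p1 then
        chunkMergeLoopA x p0 p1 idx f (i+2) (acc ++ [idx])
      else
        chunkMergeLoopA x p0 p1 idx f (i+1) (acc ++ [x.getD i 0])
    else acc

def chunk_merge (bytes : List (List Int)) (pair : Int × Int) (index : Int) : List (List Int) :=
  bytes.foldl (fun new_bytes x => new_bytes ++ [chunkMergeLoopA x pair.1 pair.2 index x.length 0 []]) []

-- ===== PORT B =====
-- B's inner for loop: stack kept in reverse order (Python's stack[-1]/append at the back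
-- become head/cons here), reversed once at the end; just is the just_merged flag.
def chunkMergeLoopB (p0 p1 idx : Int) (vs : List Int) (stack : List Int) (just : Bool) : List Int :=
  match vs with
  | [] => stack.reverse
  | v :: rest =>
    match just with
    | true => chunkMergeLoopB p0 p1 idx rest (v :: stack) false
    | false =>
      match stack with
      | [] => chunkMergeLoopB p0 p1 idx rest [v] false
      | s :: tl =>
        if s = p0 ∧ v = p1 then chunkMergeLoopB p0 p1 idx rest (idx :: tl) true
        else chunkMergeLoopB p0 p1 idx rest (v :: s :: tl) false

def chunk_merge_alt (bytes : List (List Int)) (pair : Int × Int) (index : Int) : List (List Int) :=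
  bytes.foldl (fun out x => out ++ [chunkMergeLoopB pair.1 pair.2 index x [] false]) []

-- ===== PRECONDITION & SPEC =====
def Spec_chunk_merge (bytes : List (List Int)) (pair : Int × Int) (index : Int) (out : List (List Int)) : Prop := out = chunk_merge_alt bytes pair index
instance (bytes : List (List Int)) (pair : Int × Int) (index : Int) (out : List (List Int)) : Decidable (Spec_chunk_merge bytes pair index out) := by unfold Spec_chunk_merge; infer_instance

-- ===== CLAIM (what is proved, stated in full; the proofs are below) =====
def Claim_equal_chunk_merge : Prop := ∀ (bytes : List (List Int)) (pair : Int × Int) (index : Int), Dom_chunk_merge bytes pair index → Spec_chunk_merge bytes pair index (chunk_merge bytes pair index)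

-- ===== LEMMAS AND PROOFS =====

-- reference recursion: leftmost greedy non-overlapping pair merge
def mSpec (p0 p1 idx : Int) : List Int → List Int
  | a :: b :: rest =>
    if a = p0 ∧ b = p1 then idx :: mSpec p0 p1 idx rest
    else a :: mSpec p0 p1 idx (b :: rest)
  | [a] => [a]
  | [] => []

lemma loopA_eq_mSpec (x : List Int) (p0 p1 idx : Int) :
    ∀ fuel i acc, x.length - i ≤ fuel →
      chunkMergeLoopA x p0 p1 idx fuel i acc = acc ++ mSpec p0 p1 idx (x.drop i) := by
  intro fuel
  induction fuel with
  | zero =>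
    intro i acc hf
    rw [chunkMergeLoopA, List.drop_eq_nil_of_le (by omega)]
    simp [mSpec]
  | succ f ih =>
    intro i acc hf
    rw [chunkMergeLoopA]
    by_cases h : i < x.length
    · rw [if_pos h]
      by_cases hc : i + 1 < x.length ∧ x.getD i 0 = p0 ∧ x.getD (i+1) 0 = p1
      · obtain ⟨h1, hp0, hp1⟩ := hc
        have e0 : x[i] = p0 := by rw [← List.getD_eq_getElem x 0 h]; exact hp0
        have e1 : x[i+1] = p1 := by rw [← List.getD_eq_getElem x 0 h1]; exact hp1
        rw [if_pos ⟨h1, hp0, hp1⟩, ih (i+2) _ (by omega),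
          List.drop_eq_getElem_cons h, List.drop_eq_getElem_cons h1, mSpec,
          if_pos ⟨e0, e1⟩]
        simp
      · have e0 : x.getD i 0 = x[i] := List.getD_eq_getElem x 0 h
        rw [if_neg hc, ih (i+1) _ (by omega), List.drop_eq_getElem_cons h]
        by_cases h1 : i + 1 < x.length
        · have e1 : x.getD (i+1) 0 = x[i+1] := List.getD_eq_getElem x 0 h1
          have hne : ¬ (x[i] = p0 ∧ x[i+1] = p1) := by
            intro ⟨a1, a2⟩; exact hc ⟨h1, by rw [e0, a1], by rw [e1, a2]⟩
          rw [List.drop_eq_getElem_cons h1, mSpec, if_neg hne, e0]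
          simp
        · have hnil : x.drop (i+1) = [] := List.drop_eq_nil_of_le (by omega)
          rw [hnil, e0]
          simp [mSpec]
    · rw [if_neg h, List.drop_eq_nil_of_le (by omega)]
      simp [mSpec]

lemma loopB_eq_mSpec_aux (p0 p1 idx : Int) :
    ∀ vs : List Int,
      (∀ stack, chunkMergeLoopB p0 p1 idx vs stack true =
          stack.reverse ++ mSpec p0 p1 idx vs) ∧
      (∀ a stack, chunkMergeLoopB p0 p1 idx vs (a :: stack) false =
          stack.reverse ++ mSpec p0 p1 idx (a :: vs)) := by
  intro vs
  induction vs with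
  | nil =>
    refine ⟨fun stack => ?_, fun a stack => ?_⟩
    · simp [chunkMergeLoopB, mSpec]
    · simp [chunkMergeLoopB, mSpec]
  | cons b rest ih =>
    refine ⟨fun stack => ?_, fun a stack => ?_⟩
    · show chunkMergeLoopB p0 p1 idx rest (b :: stack) false = _
      cases stack with
      | nil => simpa using ih.2 b []
      | cons s tl => simpa using ih.2 b (s :: tl)
    · show (if a = p0 ∧ b = p1 then chunkMergeLoopB p0 p1 idx rest (idx :: stack) true
          else chunkMergeLoopB p0 p1 idx rest (b :: a :: stack) false) = _
      by_cases hm : a = p0 ∧ b = p1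
      · rw [if_pos hm, ih.1 (idx :: stack), mSpec, if_pos hm]
        simp
      · rw [if_neg hm, ih.2 b (a :: stack), mSpec, if_neg hm]
        simp

lemma loopB_eq_mSpec (p0 p1 idx : Int) (x : List Int) :
    chunkMergeLoopB p0 p1 idx x [] false = mSpec p0 p1 idx x := by
  cases x with
  | nil => rfl
  | cons v vs =>
    show chunkMergeLoopB p0 p1 idx vs [v] false = _
    simpa using (loopB_eq_mSpec_aux p0 p1 idx vs).2 v []

lemma inner_eq (p0 p1 idx : Int) (x : List Int) :
    chunkMergeLoopA x p0 p1 idx x.length 0 [] = chunkMergeLoopB p0 p1 idx x [] false := by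
  rw [loopB_eq_mSpec]
  simpa using loopA_eq_mSpec x p0 p1 idx x.length 0 [] (by omega)

-- ===== VERDICT (by name: the statement is the Claim_ definition above) =====
theorem chunk_merge_spec : Claim_equal_chunk_merge := by
  intro bytes pair index hD
  clear hD
  unfold Spec_chunk_merge chunk_merge chunk_merge_alt
  induction bytes using List.reverseRecOn with
  | nil => rfl
  | append_singleton xs x ih =>
    simp only [List.foldl_append, List.foldl_cons, List.foldl_nil, ih,
      inner_eq pair.1 pair.2 index x]
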